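-- pv_equiv track=rewrite | github.com/bvbohnen/X4_Customizer | X4_Customizer/Transforms/Jobs.py | Find_entry_match
-- ===== SOURCE A (Python) =====
-- def Find_entry_match(job_dict, entry_list):
--     '''
--     Support function tries to find which entry in the entry_list matches
--     to a given job_dict, matching flags first, then job name, returning
--     the first entry in entry_list that matches.
--     '''
--     # This will attempt to match a flag in the job_dict first,
--     #  then a partial name match, then a wildcard if one given.
--     # Loop over list entries, in order.
--     for key, entry in entry_list:
--         # Check for direct key match; assume value is boolean.
--         if key in job_dict and job_dict[key] == '1':
--             return entry
--
--     # Loop again.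
--     for key, entry in entry_list:
--
--         # Check for job name match; partial match supported, the key
--         #  just needs to be present in the job name.
--         if key in job_dict['name']:
--             return entry
--
--     # Loop again.
--     for key, entry in entry_list:
--         # Wildcard match.
--         if key == '*':
--             return entry
--
--     # Probably shouldn't be here, but return None.
--     return None
-- ===== SOURCE B (Python) =====
-- def Find_entry_match(job_dict, entry_list):
--     # Rank each entry by match priority (0 flag, 1 name substring, 2 wildcard, 3 none)
--     # and keep the first entry achieving the lowest rank, in one pass.
--     name = job_dict.get('name', '')
--     best_rank = 3
--     best_entry = None
--     for key, entry in entry_list: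
--         if key in job_dict and job_dict[key] == '1':
--             rank = 0
--         elif key in name:
--             rank = 1
--         elif key == '*':
--             rank = 2
--         else:
--             rank = 3
--         if rank < best_rank:
--             best_rank = rank
--             best_entry = entry
--     return best_entry
-- ===== Notes on version B (the rewrite author's own statement) =====
-- stated objective: alternative
-- what changed: Replaces A's three staged full scans of entry_list (flag pass, then name pass, then wildcard pass) with a single pass that assigns each entry a priority rank (0 flag-match, 1 name-substring, 2 wildcard, 3 none) and keeps the first entry achieving the lowest rank via a running-minimum accumulator; 'name' is read once with dict.get.
import Mathlib
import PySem

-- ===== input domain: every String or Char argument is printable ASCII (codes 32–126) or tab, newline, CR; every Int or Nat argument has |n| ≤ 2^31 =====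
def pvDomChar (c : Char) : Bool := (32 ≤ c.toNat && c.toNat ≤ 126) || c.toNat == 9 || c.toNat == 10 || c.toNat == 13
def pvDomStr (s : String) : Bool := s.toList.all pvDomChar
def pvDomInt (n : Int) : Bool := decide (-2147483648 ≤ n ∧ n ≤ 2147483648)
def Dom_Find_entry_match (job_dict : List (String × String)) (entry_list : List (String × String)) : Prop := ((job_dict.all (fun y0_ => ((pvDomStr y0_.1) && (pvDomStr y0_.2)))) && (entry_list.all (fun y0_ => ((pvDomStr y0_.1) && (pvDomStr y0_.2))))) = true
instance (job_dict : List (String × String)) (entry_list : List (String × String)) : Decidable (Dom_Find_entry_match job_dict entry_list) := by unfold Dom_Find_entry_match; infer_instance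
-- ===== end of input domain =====

-- B replaces A's three staged scans by ONE pass that ranks each entry (0 flag, 1 name, 2 wildcard, 3 none)
-- and keeps the first entry of lowest rank (objective: alternative).
-- Python A raises KeyError when 'name' is absent and the name pass is reached: excluded by Pre_.

-- ===== PORT A =====
-- first loop: flag match
def femFlagLoop (job_dict : PySem.Dict String String) : List (String × String) → Option String
  | [] => none
  | (key, entry) :: rest =>
    -- `key in job_dict and job_dict[key] == '1'`
    match job_dict.get? key with
    | some v => if v = "1" then some entry else femFlagLoop job_dict rest
    | none => femFlagLoop job_dict rest

-- second loop: substring match against job_dict['name']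
def femNameLoop (name : String) : List (String × String) → Option String
  | [] => none
  | (key, entry) :: rest =>
    if PySem.Str.isIn key name then some entry else femNameLoop name rest

-- third loop: wildcard
def femStarLoop : List (String × String) → Option String
  | [] => none
  | (key, entry) :: rest => if key = "*" then some entry else femStarLoop rest

def Find_entry_match (job_dict : List (String × String)) (entry_list : List (String × String)) : Option String :=
  match femFlagLoop (PySem.Dict.ofList job_dict) entry_list with
  | some entry => some entry
  | none =>
    -- job_dict['name'] raises KeyError when 'name' is absent; Pre_ excludes that, getD is exact inside Pre_
    match femNameLoop ((PySem.Dict.ofList job_dict).getD "name" "") entry_list with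
    | some entry => some entry
    | none => femStarLoop entry_list

-- ===== PORT B =====
-- rank of one entry: 0 flag match, 1 substring of name, 2 wildcard, 3 no match
def femRankTail (name : String) (key : String) : Nat :=
  if PySem.Str.isIn key name then 1 else if key = "*" then 2 else 3

def femRank (job_dict : PySem.Dict String String) (name : String) (key : String) : Nat :=
  -- `key in job_dict and job_dict[key] == '1'`
  match job_dict.get? key with
  | some v => if v = "1" then 0 else femRankTail name key
  | none => femRankTail name key

-- single pass keeping the first entry of strictly lowest rank seen so far
def femBest (job_dict : PySem.Dict String String) (name : String) :
    List (String × String) → Nat → Option String → Option String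
  | [], _, best => best
  | (key, entry) :: rest, bestRank, best =>
    if femRank job_dict name key < bestRank
    then femBest job_dict name rest (femRank job_dict name key) (some entry)
    else femBest job_dict name rest bestRank best

def Find_entry_match_alt (job_dict : List (String × String)) (entry_list : List (String × String)) : Option String :=
  -- `name = job_dict.get('name', '')`
  femBest (PySem.Dict.ofList job_dict) ((PySem.Dict.ofList job_dict).getD "name" "") entry_list 3 none

-- ===== PRECONDITION & SPEC =====
-- Pre_ excludes exactly the inputs where Python A raises KeyError: entry_list nonempty, no entry flag-matches,
-- and job_dict has no 'name' key.
def Pre_Find_entry_match (job_dict : List (String × String)) (entry_list : List (String × String)) : Prop :=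
  entry_list = [] ∨ (∃ p ∈ entry_list, (PySem.Dict.ofList job_dict).get? p.1 = some "1") ∨ (PySem.Dict.ofList job_dict).contains "name" = true
instance (job_dict : List (String × String)) (entry_list : List (String × String)) : Decidable (Pre_Find_entry_match job_dict entry_list) := by unfold Pre_Find_entry_match; infer_instance

def pvWitness_Find_entry_match : (List (String × String)) × (List (String × String)) :=
  ([("name", "abc")], [("b", "e1"), ("*", "e2")])

def Spec_Find_entry_match (job_dict : List (String × String)) (entry_list : List (String × String)) (out : Option String) : Prop := out = Find_entry_match_alt job_dict entry_list
instance (job_dict : List (String × String)) (entry_list : List (String × String)) (out : Option String) : Decidable (Spec_Find_entry_match job_dict entry_list out) := by unfold Spec_Find_entry_match; infer_instance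

-- ===== CLAIM (what is proved, stated in full; the proofs are below) =====
def Claim_equal_Find_entry_match : Prop := ∀ (job_dict : List (String × String)) (entry_list : List (String × String)), Dom_Find_entry_match job_dict entry_list → Pre_Find_entry_match job_dict entry_list → Spec_Find_entry_match job_dict entry_list (Find_entry_match job_dict entry_list)

-- ===== LEMMAS AND PROOFS =====

-- minimum rank over a list (3 on the empty list)
def femMinRank (d : PySem.Dict String String) (n : String) : List (String × String) → Nat
  | [] => 3
  | p :: rest => min (femRank d n p.1) (femMinRank d n rest)

theorem femRankTail_pos (n key : String) : 1 ≤ femRankTail n key := by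
  unfold femRankTail; split_ifs <;> omega

theorem femRankTail_le_three (n key : String) : femRankTail n key ≤ 3 := by
  unfold femRankTail; split_ifs <;> omega

theorem femRank_le_three (d : PySem.Dict String String) (n key : String) : femRank d n key ≤ 3 := by
  unfold femRank
  cases d.get? key with
  | none => exact femRankTail_le_three n key
  | some v =>
    show (if v = "1" then 0 else femRankTail n key) ≤ 3
    split_ifs
    · omega
    · exact femRankTail_le_three n key

theorem femRankTail_eq_one (n key : String) (h : PySem.Str.isIn key n = true) :
    femRankTail n key = 1 := by
  unfold femRankTail; rw [if_pos h]

theorem femRankTail_eq_ite (n key : String) (h : PySem.Str.isIn key n = false) :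
    femRankTail n key = if key = "*" then 2 else 3 := by
  unfold femRankTail
  rw [if_neg (by rw [h]; exact Bool.false_ne_true)]

theorem femRank_eq_tail_of_pos (d : PySem.Dict String String) (n key : String)
    (hq : 1 ≤ femRank d n key) : femRank d n key = femRankTail n key := by
  unfold femRank at hq ⊢
  cases hdk : d.get? key with
  | none => rfl
  | some v =>
    rw [hdk] at hq
    replace hq : 1 ≤ (if v = "1" then 0 else femRankTail n key) := hq
    show (if v = "1" then 0 else femRankTail n key) = femRankTail n key
    split_ifs at hq ⊢ with hv
    · omega
    · rfl

theorem femMinRank_le (d : PySem.Dict String String) (n : String) (l : List (String × String))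
    (p : String × String) (hp : p ∈ l) : femMinRank d n l ≤ femRank d n p.1 := by
  induction l with
  | nil => cases hp
  | cons q rest ih =>
    rcases List.mem_cons.mp hp with h | h
    · subst h; simp only [femMinRank]; exact Nat.min_le_left _ _
    · exact le_trans (by simp only [femMinRank]; exact Nat.min_le_right _ _) (ih h)

theorem femMinRank_lt_three (d : PySem.Dict String String) (n : String) (l : List (String × String))
    (h : femMinRank d n l < 3) : ∃ p ∈ l, femRank d n p.1 = femMinRank d n l := by
  induction l with
  | nil => simp [femMinRank] at h
  | cons q rest ih =>
    simp only [femMinRank] at h ⊢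
    rcases Nat.lt_or_ge (femRank d n q.1) (femMinRank d n rest) with hlt | hge
    · exact ⟨q, by simp, by omega⟩
    · rcases ih (by omega) with ⟨p, hp, hr⟩
      exact ⟨p, by simp [hp], by omega⟩

-- pointwise-on-members congruence for find? (no library lemma available for this)
theorem femFind_congr {α : Type} (p q : α → Bool) (l : List α)
    (h : ∀ x ∈ l, p x = q x) : l.find? p = l.find? q := by
  induction l with
  | nil => rfl
  | cons a rest ih =>
    have ha := h a (by simp)
    rw [List.find?_cons, List.find?_cons, ha]
    cases q a with
    | false => exact ih fun x hx => h x (by simp [hx])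
    | true => rfl

-- the running-minimum pass returns the first entry achieving the minimum rank
theorem femBest_char (d : PySem.Dict String String) (n : String) (l : List (String × String))
    (br : Nat) (best : Option String) (hbr3 : br ≤ 3) :
    femBest d n l br best =
      if femMinRank d n l < br
      then (l.find? (fun p => femRank d n p.1 ≤ femMinRank d n l)).map Prod.snd
      else best := by
  induction l generalizing br best with
  | nil =>
    have h3 : ¬ femMinRank d n ([] : List (String × String)) < br := by
      simp only [femMinRank]; omega
    simp [femBest, h3]
  | cons q rest ih =>
    obtain ⟨key, entry⟩ := q
    have hr3 := femRank_le_three d n key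
    simp only [femBest]
    by_cases hbr : femRank d n key < br
    · rw [if_pos hbr, ih _ _ hr3]
      by_cases hrest : femMinRank d n rest < femRank d n key
      · have hcons : femMinRank d n ((key, entry) :: rest) = femMinRank d n rest := by
          simp only [femMinRank]; omega
        simp only [hcons]
        rw [if_pos hrest, if_pos (lt_trans hrest hbr),
          List.find?_cons_of_neg (by show ¬ decide (femRank d n key ≤ femMinRank d n rest) = true; simp; omega)]
      · have hcons : femMinRank d n ((key, entry) :: rest) = femRank d n key := by
          simp only [femMinRank]; omega
        simp only [hcons]
        rw [if_neg hrest, if_pos hbr,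
          List.find?_cons_of_pos (by show decide (femRank d n key ≤ femRank d n key) = true; simp)]
        rfl
    · rw [if_neg hbr, ih _ _ hbr3]
      by_cases hrest : femMinRank d n rest < br
      · have hcons : femMinRank d n ((key, entry) :: rest) = femMinRank d n rest := by
          simp only [femMinRank]; omega
        simp only [hcons]
        rw [if_pos hrest, if_pos hrest,
          List.find?_cons_of_neg (by show ¬ decide (femRank d n key ≤ femMinRank d n rest) = true; simp; omega)]
      · have hcons : ¬ femMinRank d n ((key, entry) :: rest) < br := by
          simp only [femMinRank]; omega
        rw [if_neg hrest, if_neg hcons]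

-- A's flag loop as a find? over rank = 0
theorem femFlagLoop_eq (d : PySem.Dict String String) (n : String) (l : List (String × String)) :
    femFlagLoop d l = (l.find? (fun p => femRank d n p.1 == 0)).map Prod.snd := by
  induction l with
  | nil => rfl
  | cons q rest ih =>
    obtain ⟨key, entry⟩ := q
    simp only [femFlagLoop]
    cases hkey : d.get? key with
    | none =>
      rw [List.find?_cons_of_neg (by
        show ¬ (femRank d n key == 0) = true
        simp [femRank, hkey]
        have := femRankTail_pos n key; omega)]
      exact ih
    | some v =>
      show (if v = "1" then some entry else femFlagLoop d rest) = _
      by_cases hv : v = "1"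
      · rw [if_pos hv, List.find?_cons_of_pos (by
          show (femRank d n key == 0) = true
          simp [femRank, hkey, hv])]
        rfl
      · rw [if_neg hv, List.find?_cons_of_neg (by
          show ¬ (femRank d n key == 0) = true
          simp [femRank, hkey, hv]
          have := femRankTail_pos n key; omega)]
        exact ih

-- A's name loop as a find? over rank = 1, when no entry flag-matches
theorem femNameLoop_eq (d : PySem.Dict String String) (n : String) (l : List (String × String))
    (h : ∀ p ∈ l, 1 ≤ femRank d n p.1) :
    femNameLoop n l = (l.find? (fun p => femRank d n p.1 == 1)).map Prod.snd := by
  induction l with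
  | nil => rfl
  | cons q rest ih =>
    obtain ⟨key, entry⟩ := q
    have hq : 1 ≤ femRank d n key := h (key, entry) (by simp)
    have htail : femRank d n key = femRankTail n key := femRank_eq_tail_of_pos d n key hq
    simp only [femNameLoop]
    by_cases hin : PySem.Str.isIn key n = true
    · rw [if_pos hin, List.find?_cons_of_pos (by
        show (femRank d n key == 1) = true
        rw [htail, femRankTail_eq_one n key hin]
        rfl)]
      rfl
    · have hin' : PySem.Str.isIn key n = false := by
        revert hin; cases PySem.Str.isIn key n <;> simp
      have hval : femRank d n key = if key = "*" then 2 else 3 := by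
        rw [htail, femRankTail_eq_ite n key hin']
      rw [if_neg hin, List.find?_cons_of_neg (by
        show ¬ (femRank d n key == 1) = true
        rw [hval]; split_ifs <;> simp)]
      exact ih fun p hp => h p (List.mem_cons_of_mem _ hp)

-- A's wildcard loop as a find? over rank = 2, when no entry flag- or name-matches
theorem femStarLoop_eq (d : PySem.Dict String String) (n : String) (l : List (String × String))
    (h : ∀ p ∈ l, 2 ≤ femRank d n p.1) :
    femStarLoop l = (l.find? (fun p => femRank d n p.1 == 2)).map Prod.snd := by
  induction l with
  | nil => rfl
  | cons q rest ih =>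
    obtain ⟨key, entry⟩ := q
    have hq : 2 ≤ femRank d n key := h (key, entry) (by simp)
    have htail : femRank d n key = femRankTail n key := femRank_eq_tail_of_pos d n key (by omega)
    have hin : PySem.Str.isIn key n = false := by
      cases hIn : PySem.Str.isIn key n with
      | false => rfl
      | true =>
        exfalso
        have h1 : femRank d n key = 1 := by rw [htail, femRankTail_eq_one n key hIn]
        omega
    have hval : femRank d n key = if key = "*" then 2 else 3 := by
      rw [htail, femRankTail_eq_ite n key hin]
    simp only [femStarLoop]
    by_cases hstar : key = "*"
    · rw [if_pos hstar, List.find?_cons_of_pos (by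
        show (femRank d n key == 2) = true
        rw [hval, if_pos hstar]
        rfl)]
      rfl
    · rw [if_neg hstar, List.find?_cons_of_neg (by
        show ¬ (femRank d n key == 2) = true
        simp [hval, hstar])]
      exact ih fun p hp => h p (List.mem_cons_of_mem _ hp)

-- the single pass equals A's three staged passes
theorem fem_main (d : PySem.Dict String String) (n : String) (l : List (String × String)) :
    femBest d n l 3 none =
      match femFlagLoop d l with
      | some entry => some entry
      | none =>
        match femNameLoop n l with
        | some entry => some entry
        | none => femStarLoop l := by
  rw [femBest_char d n l 3 none (le_refl 3), femFlagLoop_eq d n l]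
  by_cases h3 : femMinRank d n l < 3
  · obtain ⟨m, hm⟩ : ∃ m, femMinRank d n l = m := ⟨_, rfl⟩
    have hle : ∀ p ∈ l, m ≤ femRank d n p.1 := fun p hp => hm ▸ femMinRank_le d n l p hp
    obtain ⟨p0, hp0, hp0r⟩ := femMinRank_lt_three d n l h3
    rw [hm] at hp0r h3
    simp only [hm]
    rw [if_pos h3,
      femFind_congr _ (fun p => femRank d n p.1 == m) l (fun x hx => by
        have hx1 := hle x hx
        by_cases he : femRank d n x.1 = m
        · simp [he]
        · have hnle : ¬ femRank d n x.1 ≤ m := by omega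
          simp [he, hnle])]
    interval_cases m
    · -- the flag pass finds the answer
      have hsome : (l.find? (fun p => femRank d n p.1 == 0)).isSome := by
        rw [List.find?_isSome]
        exact ⟨p0, hp0, by rw [hp0r]; rfl⟩
      obtain ⟨e, hfind⟩ := Option.isSome_iff_exists.mp hsome
      rw [hfind]
      rfl
    · -- no flag match: A falls through to the name pass
      have hnone0 : l.find? (fun p => femRank d n p.1 == 0) = none :=
        List.find?_eq_none.mpr (fun p hp => by
          have := hle p hp; simp only [beq_iff_eq]; omega)
      rw [hnone0, femNameLoop_eq d n l hle]
      have hsome : (l.find? (fun p => femRank d n p.1 == 1)).isSome := by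
        rw [List.find?_isSome]
        exact ⟨p0, hp0, by rw [hp0r]; rfl⟩
      obtain ⟨e, hfind⟩ := Option.isSome_iff_exists.mp hsome
      rw [hfind]
      rfl
    · -- no flag or name match: A falls through to the wildcard pass
      have hnone0 : l.find? (fun p => femRank d n p.1 == 0) = none :=
        List.find?_eq_none.mpr (fun p hp => by
          have := hle p hp; simp only [beq_iff_eq]; omega)
      have hnone1 : l.find? (fun p => femRank d n p.1 == 1) = none :=
        List.find?_eq_none.mpr (fun p hp => by
          have := hle p hp; simp only [beq_iff_eq]; omega)
      rw [hnone0, femNameLoop_eq d n l (fun p hp => by have := hle p hp; omega), hnone1,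
        femStarLoop_eq d n l hle]
      rfl
  · -- every rank is 3: all three passes find nothing
    have hge : ∀ p ∈ l, femRank d n p.1 = 3 := fun p hp => by
      have h1 := femMinRank_le d n l p hp
      have h2 := femRank_le_three d n p.1
      omega
    have hnone0 : l.find? (fun p => femRank d n p.1 == 0) = none :=
      List.find?_eq_none.mpr (fun p hp => by
        have := hge p hp; simp only [beq_iff_eq]; omega)
    have hnone1 : l.find? (fun p => femRank d n p.1 == 1) = none :=
      List.find?_eq_none.mpr (fun p hp => by
        have := hge p hp; simp only [beq_iff_eq]; omega)
    have hnone2 : l.find? (fun p => femRank d n p.1 == 2) = none :=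
      List.find?_eq_none.mpr (fun p hp => by
        have := hge p hp; simp only [beq_iff_eq]; omega)
    rw [if_neg h3, hnone0, femNameLoop_eq d n l (fun p hp => by have := hge p hp; omega),
      hnone1, femStarLoop_eq d n l (fun p hp => by have := hge p hp; omega), hnone2]
    rfl

theorem Find_entry_match_eq (job_dict : List (String × String)) (entry_list : List (String × String)) :
    Find_entry_match job_dict entry_list = Find_entry_match_alt job_dict entry_list := by
  unfold Find_entry_match Find_entry_match_alt
  exact (fem_main (PySem.Dict.ofList job_dict)
    ((PySem.Dict.ofList job_dict).getD "name" "") entry_list).symm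

-- ===== VERDICT (by name: the statement is the Claim_ definition above) =====
theorem Find_entry_match_spec : Claim_equal_Find_entry_match := by
  intro job_dict entry_list _ _
  unfold Spec_Find_entry_match
  exact Find_entry_match_eq job_dict entry_list
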